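-- pv_equiv track=rewrite | github.com/VIBogdanov/demo-python | src/demo/sundry.py | find_intervals
-- ===== SOURCE A (Python) =====
-- import itertools
-- from collections import defaultdict, deque
-- from collections.abc import Iterable, Iterator, Sequence
--
-- def find_intervals(
--     elements: Iterable[int],
--     target: int,
-- ) -> list[tuple[int, int]]:
--     """
--     Поиск в списке из чисел последовательного непрерывного интервала(-ов) чисел,
--     сумма которых равна искомому значению.
--     Суть алгоритма выражена формулой: Sum2 - Sum1 = Target >> Sum2 - Target = Sum1
--       - Вычислить все суммы от начала до текущей позиции.
--       - Для каждой суммы вычислить Sum - Target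
--       - Найти полученное значение в списке сумм
--       - Если пара найдена, извлечь индексы и составить диапазон
--
--     Args:
--         elements (Iterable[int]): Список неупорядоченных целых чисел, включая отрицательные значения.
--
--         target (int): Искомое целое число, для которого ищется сумма элементов списка.
--
--     Returns:
--         (list[tuple[int, int]]): Результирующий список диапазонов элементов. Диапазоны задаются в виде
--         кортежей пары целых чисел, обозначающих индексы элементов списка, включая начальный и
--         конечный индексы включительно. Если ни один диапазон не найден, возвращается пустой список.
--
--     Example:
--         >>> find_intervals([1, -3, 4, 5], 9) -> [(2, 3)]
--
--         >>> find_intervals([1, -1, 4, 3, 2, 1, -3, 4, 5, -5, 5], 0) -> [(0, 1), (4, 6), (8, 9), (9, 10)]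
--     """
--     try:
--         _target: int = int(target)
--     except (ValueError, TypeError):
--         return []
--     else:
--         sum_dict: defaultdict = defaultdict(list[int])
--         result_list: list[tuple[int, int]] = list()
--
--         # Суммируем элементы списка по нарастающей и сохраняем в словаре
--         # список индексов для каждой суммы. В качестве ключа - сама сумма.
--         for id_to, sum_accum in enumerate(itertools.accumulate(elements)):
--             # Если на очередной итерации полученная сумма равна искомому значению,
--             # заносим диапазон от 0 до текущей позиции в результирующий список.
--             if sum_accum == _target:
--                 result_list.append((0, id_to))
--             # Ищем пару из уже вычисленных ранее сумм для значения (Sum - Target).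
--             # Если пара найдена, извлекаем индексы и формируем результирующие диапазоны.
--             for id_from in sum_dict.get((sum_accum - _target), []):
--                 result_list.append((id_from + 1, id_to))
--             # Сохраняем очередную сумму и ее индекс в словаре, где ключ - сама сумма.
--             sum_dict[sum_accum].append(id_to)
--
--         return result_list
-- ===== SOURCE B (Python) =====
-- def find_intervals(elements, target):
--     try:
--         _target = int(target)
--     except (ValueError, TypeError):
--         return []
--     arr = list(elements)
--     # prefix[i] = sum of arr[:i]
--     prefix = [0]
--     acc = 0
--     for x in arr:
--         acc += x
--         prefix.append(acc)
--     result = []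
--     for end in range(len(arr)):
--         for start in range(end + 1):
--             if prefix[end + 1] - prefix[start] == _target:
--                 result.append((start, end))
--     return result
-- ===== Notes on version B (the rewrite author's own statement) =====
-- stated objective: simpler
-- what changed: Replaces the running-sum defaultdict of index lists with a plain prefix-sum array and an end-major nested scan over all (start, end) pairs, appending a pair whenever prefix[end+1]-prefix[start] equals target.
import Mathlib
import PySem

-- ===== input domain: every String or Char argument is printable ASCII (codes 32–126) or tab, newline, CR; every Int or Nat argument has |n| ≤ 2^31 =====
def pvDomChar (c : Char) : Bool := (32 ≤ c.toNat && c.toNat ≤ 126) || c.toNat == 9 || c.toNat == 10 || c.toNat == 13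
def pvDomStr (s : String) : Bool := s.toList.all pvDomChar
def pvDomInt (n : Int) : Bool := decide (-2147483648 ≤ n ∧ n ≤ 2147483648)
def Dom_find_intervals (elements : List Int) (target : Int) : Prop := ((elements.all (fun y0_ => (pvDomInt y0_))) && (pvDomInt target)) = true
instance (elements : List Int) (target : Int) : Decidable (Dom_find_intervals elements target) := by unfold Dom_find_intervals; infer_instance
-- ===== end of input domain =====

-- B replaces A's running-sum dict of index lists by a prefix-sum array with an
-- end-major nested scan over all (start, end) pairs: simpler, same return value.

-- ===== PORT A =====
-- itertools.accumulate(elements): hand port (exact — the running prefix sums, one per element)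
def pyAccumulate (xs : List Int) : List Int :=
  (xs.foldl (fun (st : Int × List Int) x => (st.1 + x, st.2 ++ [st.1 + x])) (0, [])).2

def find_intervals (elements : List Int) (target : Int) : List (Int × Int) :=
  -- int(target) on an int never raises, so the try/except always takes the else branch
  let tgt : Int := target
  (((PySem.List.enumerate (pyAccumulate elements) 0).foldl
    (fun (st : PySem.Dict Int (List Int) × List (Int × Int)) p =>
      let id_to := p.1
      let sum_accum := p.2
      let res1 := if sum_accum = tgt then st.2 ++ [((0 : Int), id_to)] else st.2
      let res2 := res1 ++ (st.1.getD (sum_accum - tgt) []).map (fun id_from => (id_from + 1, id_to))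
      (st.1.modify sum_accum [] (fun l => l ++ [id_to]), res2))
    (PySem.Dict.empty, []))).2

-- ===== PORT B =====
def find_intervals_alt (elements : List Int) (target : Int) : List (Int × Int) :=
  let tgt : Int := target
  let arr := elements
  let pr := (arr.foldl (fun (st : Int × List Int) x => (st.1 + x, st.2 ++ [st.1 + x])) (0, [(0 : Int)])).2
  (PySem.List.pyRange 0 (arr.length : Int) 1).foldl (fun res e =>
    (PySem.List.pyRange 0 (e + 1) 1).foldl (fun res s =>
      if PySem.List.pyGetD pr (e + 1) 0 - PySem.List.pyGetD pr s 0 = tgt then res ++ [(s, e)] else res)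
      res) []

-- ===== PRECONDITION & SPEC =====
def Spec_find_intervals (elements : List Int) (target : Int) (out : List (Int × Int)) : Prop := out = find_intervals_alt elements target
instance (elements : List Int) (target : Int) (out : List (Int × Int)) : Decidable (Spec_find_intervals elements target out) := by unfold Spec_find_intervals; infer_instance

-- ===== CLAIM (what is proved, stated in full; the proofs are below) =====
def Claim_equal_find_intervals : Prop := ∀ (elements : List Int) (target : Int), Dom_find_intervals elements target → Spec_find_intervals elements target (find_intervals elements target)

-- ===== LEMMAS AND PROOFS =====

-- prefix sums starting from c, one per element
def accFrom (c : Int) : List Int → List Int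
  | [] => []
  | x :: xs => (c + x) :: accFrom (c + x) xs

theorem accFrom_length (c : Int) (xs : List Int) : (accFrom c xs).length = xs.length := by
  induction xs generalizing c with
  | nil => rfl
  | cons x xs ih => simp [accFrom, ih]

theorem accFold (xs : List Int) (c : Int) (l : List Int) :
    xs.foldl (fun (st : Int × List Int) x => (st.1 + x, st.2 ++ [st.1 + x])) (c, l)
      = (c + xs.sum, l ++ accFrom c xs) := by
  induction xs generalizing c l with
  | nil => simp [accFrom]
  | cons x xs ih => simp [accFrom, ih, add_assoc]

theorem pyAccumulate_eq (xs : List Int) : pyAccumulate xs = accFrom 0 xs := by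
  simp [pyAccumulate, accFold]

-- the canonical result: for each end position e, (0, e) if the e-th prefix sum equals
-- target, then (i+1, e) for each earlier prefix sum i with value (prefix e) - target, ascending
def deltaAt (ps : List Int) (target : Int) (e : Nat) : List (Int × Int) :=
  (if ps.getD e 0 = target then [((0 : Int), (e : Int))] else []) ++
  ((List.range e).filter (fun i => ps.getD i 0 == ps.getD e 0 - target)).map
    (fun (i : Nat) => ((i : Int) + 1, (e : Int)))

def canon (ps : List Int) (target : Int) : List (Int × Int) :=
  (List.range ps.length).flatMap (deltaAt ps target)

-- ---------- A-side ----------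

-- the loop body of A's fold, named for the proofs (definitionally A's)
def aStep (tgt : Int) (st : PySem.Dict Int (List Int) × List (Int × Int)) (p : Int × Int) :
    PySem.Dict Int (List Int) × List (Int × Int) :=
  (st.1.modify p.2 [] (fun l => l ++ [p.1]),
   (if p.2 = tgt then st.2 ++ [((0 : Int), p.1)] else st.2) ++
     (st.1.getD (p.2 - tgt) []).map (fun i => (i + 1, p.1)))

theorem find_intervals_eq (elements : List Int) (target : Int) :
    find_intervals elements target
      = ((PySem.List.enumerate (pyAccumulate elements) 0).foldl (aStep target)
          (PySem.Dict.empty, [])).2 := rfl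

def dStep (d : PySem.Dict Int (List Int)) (p : Int × Int) : PySem.Dict Int (List Int) :=
  d.modify p.2 [] (fun l => l ++ [p.1])

theorem fold_fst (tgt : Int) (l : List (Int × Int)) (d : PySem.Dict Int (List Int))
    (r : List (Int × Int)) : (l.foldl (aStep tgt) (d, r)).1 = l.foldl dStep d := by
  induction l generalizing d r with
  | nil => rfl
  | cons p l ih => simpa [aStep, dStep] using ih _ _

theorem dict_getD (l : List (Int × Int)) (v : Int) :
    (l.foldl dStep PySem.Dict.empty).getD v []
      = (l.filter (fun p => p.2 == v)).map (·.1) := by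
  have h := PySem.Dict.getD_foldl_modify_append (l.map Prod.swap)
      (PySem.Dict.empty : PySem.Dict Int (List Int)) v
  rw [List.foldl_map] at h
  simpa [dStep, List.filter_map, Function.comp, PySem.Dict.getD_empty] using h

theorem enumerate_eq_range (xs : List Int) :
    PySem.List.enumerate xs 0
      = (List.range xs.length).map (fun (k : Nat) => ((k : Int), xs.getD k 0)) := by
  induction xs using List.reverseRecOn with
  | nil => simp
  | append_singleton xs x ih =>
    rw [PySem.List.enumerate_append, ih,
      show (xs ++ [x]).length = xs.length + 1 by simp, List.range_succ, List.map_append]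
    congr 1
    · apply List.map_congr_left
      intro k hk
      rw [List.getD_append _ _ _ _ (List.mem_range.mp hk)]
    · have hx : (xs ++ [x]).getD xs.length 0 = x := by
        simp [List.getD_eq_getElem?_getD]
      simp only [PySem.List.enumerate_cons, PySem.List.enumerate_nil, List.map_cons,
        List.map_nil, hx, zero_add]

theorem enum_filter (ps : List Int) (v : Int) :
    ((PySem.List.enumerate ps 0).filter (fun p => p.2 == v)).map (·.1)
      = ((List.range ps.length).filter (fun i => ps.getD i 0 == v)).map (fun (i : Nat) => (i : Int)) := by
  rw [enumerate_eq_range, List.filter_map, List.map_map]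
  simp [Function.comp_def]

theorem deltaAt_append (ps : List Int) (x target : Int) (e : Nat) (he : e < ps.length) :
    deltaAt (ps ++ [x]) target e = deltaAt ps target e := by
  unfold deltaAt
  rw [List.getD_append _ _ _ _ he]
  congr 1
  apply congrArg (List.map _)
  apply List.filter_congr
  intro i hi
  rw [List.getD_append _ _ _ _ (lt_trans (List.mem_range.mp hi) he)]

theorem canon_append (ps : List Int) (x target : Int) :
    canon (ps ++ [x]) target = canon ps target ++
      ((if x = target then [((0 : Int), (ps.length : Int))] else []) ++
       ((List.range ps.length).filter (fun i => ps.getD i 0 == x - target)).map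
         (fun (i : Nat) => ((i : Int) + 1, (ps.length : Int)))) := by
  unfold canon
  rw [show (ps ++ [x]).length = ps.length + 1 by simp, List.range_succ, List.flatMap_append]
  congr 1
  · exact List.flatMap_congr (fun e hee => deltaAt_append ps x target e (List.mem_range.mp hee))
  · have hx : (ps ++ [x]).getD ps.length 0 = x := by
      simp [List.getD_eq_getElem?_getD]
    simp only [List.flatMap_cons, List.flatMap_nil, List.append_nil, deltaAt, hx]
    congr 1
    apply congrArg (List.map _)
    apply List.filter_congr
    intro i hi
    rw [List.getD_append _ _ _ _ (List.mem_range.mp hi)]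

theorem A_eq_canon (ps : List Int) (tgt : Int) :
    ((PySem.List.enumerate ps 0).foldl (aStep tgt)
        (PySem.Dict.empty, ([] : List (Int × Int)))).2 = canon ps tgt := by
  induction ps using List.reverseRecOn with
  | nil => simp [canon]
  | append_singleton ps x ih =>
    rw [PySem.List.enumerate_append, List.foldl_append]
    simp only [PySem.List.enumerate_cons, PySem.List.enumerate_nil, List.foldl_cons,
      List.foldl_nil, zero_add]
    rw [canon_append, ← ih]
    show (if x = tgt then _ ++ [((0:Int), (ps.length : Int))] else _) ++ _ = _
    rw [fold_fst, dict_getD, enum_filter, List.map_map]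
    split_ifs <;> simp

-- ---------- B-side ----------

theorem seg_eq_delta (ps : List Int) (tgt : Int) (e : Nat) :
    ((PySem.List.pyRange 0 ((e : Int) + 1) 1).filter
        (fun s => PySem.List.pyGetD (0 :: ps) ((e : Int) + 1) 0
                    - PySem.List.pyGetD (0 :: ps) s 0 == tgt)).map
      (fun s => (s, (e : Int)))
      = deltaAt ps tgt e := by
  rw [show ((e : Int) + 1) = ((e + 1 : Nat) : Int) by push_cast; ring,
    PySem.List.pyRange_zero_nat, List.filter_map, List.map_map,
    List.range_succ_eq_map, List.filter_cons]
  simp only [Function.comp_def, PySem.List.pyGetD_natCast, Nat.cast_zero, Nat.succ_eq_add_one,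
    List.getD_cons_succ, List.filter_map]
  have hcond : ∀ i ∈ List.range e,
      (ps.getD e 0 - ps.getD i 0 == tgt) = (ps.getD i 0 == ps.getD e 0 - tgt) := by
    intro i _
    rcases eq_or_ne (ps.getD e 0 - ps.getD i 0) tgt with h | h
    · have h2 : ps.getD i 0 = ps.getD e 0 - tgt := by omega
      rw [h, h2, beq_self_eq_true, beq_self_eq_true]
    · have h2 : ps.getD i 0 ≠ ps.getD e 0 - tgt := by omega
      have hb1 : (ps.getD e 0 - ps.getD i 0 == tgt) = false := by simpa using h
      have hb2 : (ps.getD i 0 == ps.getD e 0 - tgt) = false := by simpa using h2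
      rw [hb1, hb2]
  rw [List.filter_congr hcond]
  have h0 : PySem.List.pyGetD (0 :: ps) (0 : Int) 0 = 0 := by
    have h := PySem.List.pyGetD_natCast (0 :: ps) 0 (0 : Int)
    simp only [Nat.cast_zero, List.getD_cons_zero] at h
    exact h
  unfold deltaAt
  simp only [h0, sub_zero, beq_iff_eq]
  split_ifs with h <;> simp [Function.comp_def, Nat.succ_eq_add_one, List.map_map]

theorem B_eq_canon (elements : List Int) (tgt : Int) :
    find_intervals_alt elements tgt = canon (accFrom 0 elements) tgt := by
  have hpr : (elements.foldl (fun (st : Int × List Int) x => (st.1 + x, st.2 ++ [st.1 + x]))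
      (0, [(0 : Int)])).2 = 0 :: accFrom 0 elements := by
    rw [accFold]
    simp
  show (PySem.List.pyRange 0 (elements.length : Int) 1).foldl (fun res e =>
      (PySem.List.pyRange 0 (e + 1) 1).foldl (fun res s =>
        if PySem.List.pyGetD ((elements.foldl
              (fun (st : Int × List Int) x => (st.1 + x, st.2 ++ [st.1 + x])) (0, [(0 : Int)])).2)
            (e + 1) 0
          - PySem.List.pyGetD ((elements.foldl
              (fun (st : Int × List Int) x => (st.1 + x, st.2 ++ [st.1 + x])) (0, [(0 : Int)])).2)
            s 0 = tgt
        then res ++ [(s, e)] else res) res) []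
    = canon (accFrom 0 elements) tgt
  rw [hpr, show (elements.length : Int) = (((accFrom 0 elements).length : Nat) : Int) by
        rw [accFrom_length], PySem.List.pyRange_zero_nat, List.foldl_map]
  have hbody : (fun (res : List (Int × Int)) (e : Nat) =>
      (PySem.List.pyRange 0 ((e : Int) + 1) 1).foldl (fun res s =>
        if PySem.List.pyGetD (0 :: accFrom 0 elements) ((e : Int) + 1) 0
             - PySem.List.pyGetD (0 :: accFrom 0 elements) s 0 = tgt
        then res ++ [(s, (e : Int))] else res) res)
      = fun res e => res ++ deltaAt (accFrom 0 elements) tgt e := by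
    funext res e
    rw [show (fun (res : List (Int × Int)) (s : Int) =>
        if PySem.List.pyGetD (0 :: accFrom 0 elements) ((e : Int) + 1) 0
             - PySem.List.pyGetD (0 :: accFrom 0 elements) s 0 = tgt
        then res ++ [(s, (e : Int))] else res)
      = fun (res : List (Int × Int)) (s : Int) =>
        if (PySem.List.pyGetD (0 :: accFrom 0 elements) ((e : Int) + 1) 0
             - PySem.List.pyGetD (0 :: accFrom 0 elements) s 0 == tgt) = true
        then res ++ [(s, (e : Int))] else res by
        funext res s; simp]
    rw [PySem.List.foldl_append_if, seg_eq_delta]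
  rw [hbody, PySem.List.foldl_append_eq_flatMap]
  simp [canon]

-- ===== VERDICT (by name: the statement is the Claim_ definition above) =====
theorem find_intervals_spec : Claim_equal_find_intervals := by
  intro elements target _
  unfold Spec_find_intervals
  rw [find_intervals_eq, pyAccumulate_eq, A_eq_canon, B_eq_canon]
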